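-- pv_equiv track=rewrite | github.com/posl/comment_recommendation | script/split_gen/4_time/zh/278_B/6.py | findNextTime
-- ===== SOURCE A (Python) =====
-- def findNextTime(H,M):
--     while True:
--         M += 1
--         if M == 60:
--             H += 1
--             M = 0
--         if H == 24:
--             H = 0
--         if H // 10 == M % 10 and H % 10 == M // 10:
--             return H, M
-- ===== SOURCE B (Python) =====
-- def findNextTime(H, M):
--     cur = H * 60 + M
--     best = None
--     for h in range(24):
--         m = (h % 10) * 10 + h // 10
--         if m >= 60:
--             continue
--         d = (h * 60 + m - cur) % 1440
--         if d == 0: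
--             d = 1440
--         if best is None or d < best[0]:
--             best = (d, h, m)
--     return (best[1], best[2])
-- ===== Notes on version B (the rewrite author's own statement) =====
-- stated objective: alternative
-- what changed: Replaces the minute-by-minute simulation loop with a direct scan of the 24 hours: each hour h has a unique candidate mirror minute m=(h%10)*10+h//10, and B picks the candidate with the smallest strictly-positive circular distance from the current time.
-- outside the precondition, e.g. on findNextTime(30, 0): A returns (30, 3), B returns (10, 1); on findNextTime(-1, -1): A returns (0, 0), B returns (23, 32); on findNextTime(66, 10): A returns (70, 7), B returns (20, 2)
import Mathlib
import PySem

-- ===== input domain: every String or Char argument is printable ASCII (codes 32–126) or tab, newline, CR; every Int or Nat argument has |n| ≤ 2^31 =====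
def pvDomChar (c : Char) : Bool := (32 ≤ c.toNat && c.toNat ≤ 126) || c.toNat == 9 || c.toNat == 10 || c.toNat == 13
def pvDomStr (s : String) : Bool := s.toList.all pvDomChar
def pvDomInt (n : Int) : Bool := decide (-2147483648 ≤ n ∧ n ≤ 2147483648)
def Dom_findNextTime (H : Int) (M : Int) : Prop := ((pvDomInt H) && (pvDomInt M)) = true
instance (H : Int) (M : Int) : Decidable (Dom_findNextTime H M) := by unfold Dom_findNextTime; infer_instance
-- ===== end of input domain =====

-- B replaces A's minute-by-minute search with a direct scan of the 24 hourly mirror candidates, choosing the one at minimal positive circular distance.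

-- ===== PORT A =====
-- A's `while True` loop, with a fuel bound of 1440: inside Pre_ the loop always
-- returns within 1440 iterations (the clock cycles through all 1440 times and
-- (0,0) itself satisfies the mirror condition), so the fuel guard never fires.
def findNextTimeLoop : Nat → Int → Int → Int × Int
  | 0, H, M => (H, M)   -- unreachable inside Pre_ (totality guard only)
  | fuel + 1, H, M =>
    let M' := M + 1
    let HM := if M' == 60 then (H + 1, (0 : Int)) else (H, M')
    let H' := if HM.1 == 24 then 0 else HM.1
    let M'' := HM.2
    if PySem.Int.floordiv H' 10 == PySem.Int.mod M'' 10 &&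
       PySem.Int.mod H' 10 == PySem.Int.floordiv M'' 10 then
      (H', M'')
    else
      findNextTimeLoop fuel H' M''

def findNextTime (H : Int) (M : Int) : Int × Int :=
  findNextTimeLoop 1440 H M

-- ===== PORT B =====
def findNextTime_alt (H : Int) (M : Int) : Int × Int :=
  let cur := H * 60 + M
  let best :=
    (PySem.List.pyRange 0 24 1).foldl
      (fun (best : Option (Int × Int × Int)) h =>
        let m := PySem.Int.mod h 10 * 10 + PySem.Int.floordiv h 10
        if 60 ≤ m then best
        else
          let d0 := PySem.Int.mod (h * 60 + m - cur) 1440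
          let d := if d0 == 0 then (1440 : Int) else d0
          match best with
          | none => some (d, h, m)
          | some (bd, bh, bm) =>
            if d < bd then some (d, h, m) else some (bd, bh, bm))
      none
  match best with
  | some (_, h, m) => (h, m)
  | none => (0, 0)   -- unreachable: h = 0 always yields a candidate

-- ===== PRECONDITION & SPEC =====
-- Pre_ restricts to the function's natural domain, valid clock times; outside it
-- A either loops forever (the minute counter never realigns) or returns
-- out-of-range pairs that are not times of day (see the cites in claim.json).
def Pre_findNextTime (H : Int) (M : Int) : Prop :=
  0 ≤ H ∧ H < 24 ∧ 0 ≤ M ∧ M < 60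
instance (H : Int) (M : Int) : Decidable (Pre_findNextTime H M) := by
  unfold Pre_findNextTime; infer_instance

def pvWitness_findNextTime : Int × Int := (12, 34)

def Spec_findNextTime (H : Int) (M : Int) (out : Int × Int) : Prop := out = findNextTime_alt H M
instance (H : Int) (M : Int) (out : Int × Int) : Decidable (Spec_findNextTime H M out) := by unfold Spec_findNextTime; infer_instance

-- ===== CLAIM (what is proved, stated in full; the proofs are below) =====
def Claim_equal_findNextTime : Prop := ∀ (H : Int) (M : Int), Dom_findNextTime H M → Pre_findNextTime H M → Spec_findNextTime H M (findNextTime H M)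

-- ===== LEMMAS AND PROOFS =====

-- exhaustive check over all 1440 valid clock times
set_option maxRecDepth 100000 in
set_option maxHeartbeats 4000000 in
theorem findNextTime_eq_alt_nat :
    ∀ h : Nat, h < 24 → ∀ m : Nat, m < 60 →
      findNextTime (h : Int) (m : Int) = findNextTime_alt (h : Int) (m : Int) := by
  decide

-- ===== VERDICT (by name: the statement is the Claim_ definition above) =====
theorem findNextTime_spec : Claim_equal_findNextTime := by
  intro H M _ hpre
  obtain ⟨h0, h24, m0, m60⟩ := hpre
  unfold Spec_findNextTime
  have hH : H = ((H.toNat : Nat) : Int) := (Int.toNat_of_nonneg h0).symm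
  have hM : M = ((M.toNat : Nat) : Int) := (Int.toNat_of_nonneg m0).symm
  rw [hH, hM]
  exact findNextTime_eq_alt_nat H.toNat (by omega) M.toNat (by omega)
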